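-- pv_equiv track=rewrite | github.com/GaevoyAlex/new_strategy | analysis/ai/structured_formater.py | find_strongest_level
-- ===== SOURCE A (Python) =====
-- from typing import Dict, List, Any, Optional
--
-- def find_strongest_level(levels: List[Dict]) -> Optional[Dict]:
--     if not levels:
--         return None
--
--     strong_levels = [l for l in levels if l.get('strength') == 'strong']
--     if strong_levels:
--         return strong_levels[0]
--
--     medium_levels = [l for l in levels if l.get('strength') == 'medium']
--     if medium_levels:
--         return medium_levels[0]
--
--     return levels[0] if levels else None
-- ===== SOURCE B (Python) =====
-- def find_strongest_level(levels):
--     if not levels: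
--         return None
--     medium = None
--     for l in levels:
--         s = l.get('strength')
--         if s == 'strong':
--             return l
--         if medium is None and s == 'medium':
--             medium = l
--     return medium if medium is not None else levels[0]
-- ===== Notes on version B (the rewrite author's own statement) =====
-- stated objective: alternative
-- what changed: Replaced the two filtered-list scans with a single fused loop that returns on the first 'strong' level and records the first 'medium' level in an accumulator, with early exit.
import Mathlib
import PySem

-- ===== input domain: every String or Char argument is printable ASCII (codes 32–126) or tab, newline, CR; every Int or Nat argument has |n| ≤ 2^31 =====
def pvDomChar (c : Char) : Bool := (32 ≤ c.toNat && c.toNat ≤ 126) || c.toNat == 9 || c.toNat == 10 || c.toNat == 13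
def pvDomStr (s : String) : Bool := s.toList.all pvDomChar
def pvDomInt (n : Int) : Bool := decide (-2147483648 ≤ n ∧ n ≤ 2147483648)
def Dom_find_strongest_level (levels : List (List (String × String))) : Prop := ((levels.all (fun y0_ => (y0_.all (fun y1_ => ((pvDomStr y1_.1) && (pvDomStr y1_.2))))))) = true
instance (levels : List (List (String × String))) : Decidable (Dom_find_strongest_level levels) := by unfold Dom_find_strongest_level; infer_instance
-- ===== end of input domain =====

-- B fuses A's two filtered-list scans into one early-exit loop with a first-medium accumulator (objective: alternative, single pass with early exit).
-- ===== PORT A =====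
def pvGetStrength (l : List (String × String)) : Option String :=
  (PySem.Dict.mk l).get? "strength"

def find_strongest_level (levels : List (List (String × String))) : Option (List (String × String)) :=
  if levels = [] then none
  else
    let strong_levels := levels.filter (fun l => pvGetStrength l == some "strong")
    match strong_levels with
    | s :: _ => some s
    | [] =>
      let medium_levels := levels.filter (fun l => pvGetStrength l == some "medium")
      match medium_levels with
      | m :: _ => some m
      | [] => match levels with
              | h :: _ => some h
              | [] => none

-- ===== PORT B =====
def fsl_go (levels : List (List (String × String))) (medium : Option (List (String × String)))
    (first : List (String × String)) : Option (List (String × String)) :=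
  match levels with
  | [] => match medium with
          | some m => some m
          | none => some first
  | l :: rest =>
    let s := pvGetStrength l
    if s == some "strong" then some l
    else fsl_go rest (if medium == none && s == some "medium" then some l else medium) first

def find_strongest_level_alt (levels : List (List (String × String))) : Option (List (String × String)) :=
  match levels with
  | [] => none
  | h :: _ => fsl_go levels none h

-- ===== PRECONDITION & SPEC =====
def Spec_find_strongest_level (levels : List (List (String × String))) (out : Option (List (String × String))) : Prop := out = find_strongest_level_alt levels
instance (levels : List (List (String × String))) (out : Option (List (String × String))) : Decidable (Spec_find_strongest_level levels out) := by unfold Spec_find_strongest_level; infer_instance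

-- ===== CLAIM (what is proved, stated in full; the proofs are below) =====
def Claim_equal_find_strongest_level : Prop := ∀ (levels : List (List (String × String))), Dom_find_strongest_level levels → Spec_find_strongest_level levels (find_strongest_level levels)

-- ===== LEMMAS AND PROOFS =====

-- fsl_go computes: first strong; else the carried medium (or first filtered medium); else `first`.
theorem fsl_go_eq (levels : List (List (String × String))) :
    ∀ (medium : Option (List (String × String))) (first : List (String × String)),
    fsl_go levels medium first =
      match levels.filter (fun l => pvGetStrength l == some "strong") with
      | s :: _ => some s
      | [] =>
        match medium with
        | some m => some m
        | none =>
          match levels.filter (fun l => pvGetStrength l == some "medium") with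
          | m :: _ => some m
          | [] => some first := by
  induction levels with
  | nil => intro medium first; rfl
  | cons l rest ih =>
    intro medium first
    by_cases hs : pvGetStrength l == some "strong"
    · simp [fsl_go, hs]
    · by_cases hm : pvGetStrength l == some "medium"
      · cases medium with
        | none => simp [fsl_go, hs, hm, ih]
        | some m => simp [fsl_go, hs, hm, ih]
      · simp [fsl_go, hs, hm, ih]

-- ===== VERDICT (by name: the statement is the Claim_ definition above) =====
theorem find_strongest_level_spec : Claim_equal_find_strongest_level := by
  intro levels _
  unfold Spec_find_strongest_level find_strongest_level find_strongest_level_alt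
  cases levels with
  | nil => rfl
  | cons h t =>
    simp only [fsl_go_eq]
    split <;> simp_all
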